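-- pv_equiv track=rewrite | github.com/BillionsRichard/pycharmWorkspace | mapReduce/nlp/tf-idf.py | get_word_doc_freq
-- ===== SOURCE A (Python) =====
-- def get_word_doc_freq(all_doc_word_freq):
--     """计算语料库中的每个单词在多少篇文档中出现（doc_frequency）。
--
--     :param all_doc_word_freq:
--     :return:
--     """
--     word_doc_freq = dict()
--     for doc in all_doc_word_freq:
--         word_freq_in_doc = all_doc_word_freq.get(doc, {})
--         for word in word_freq_in_doc:
--             doc_cnt = word_doc_freq.get(word, 0) + 1
--             word_doc_freq[word] = doc_cnt
--
--     return word_doc_freq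
-- ===== SOURCE B (Python) =====
-- def get_word_doc_freq(all_doc_word_freq):
--     """Doc frequency via an intermediate word -> set-of-doc-keys index,
--     then a second pass taking set sizes (same result, different decomposition)."""
--     word_docs = {}
--     for doc, word_freq_in_doc in all_doc_word_freq.items():
--         for word in word_freq_in_doc:
--             word_docs.setdefault(word, set()).add(doc)
--     return {word: len(docs) for word, docs in word_docs.items()}
-- ===== Notes on version B (the rewrite author's own statement) =====
-- stated objective: alternative
-- what changed: Instead of incrementing an integer counter per word inside the document loop (with a redundant self-lookup all_doc_word_freq.get(doc)), B iterates .items() directly, accumulates for each word the SET of document keys containing it, and derives the counts in a separate final pass as the set sizes.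
import Mathlib
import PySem

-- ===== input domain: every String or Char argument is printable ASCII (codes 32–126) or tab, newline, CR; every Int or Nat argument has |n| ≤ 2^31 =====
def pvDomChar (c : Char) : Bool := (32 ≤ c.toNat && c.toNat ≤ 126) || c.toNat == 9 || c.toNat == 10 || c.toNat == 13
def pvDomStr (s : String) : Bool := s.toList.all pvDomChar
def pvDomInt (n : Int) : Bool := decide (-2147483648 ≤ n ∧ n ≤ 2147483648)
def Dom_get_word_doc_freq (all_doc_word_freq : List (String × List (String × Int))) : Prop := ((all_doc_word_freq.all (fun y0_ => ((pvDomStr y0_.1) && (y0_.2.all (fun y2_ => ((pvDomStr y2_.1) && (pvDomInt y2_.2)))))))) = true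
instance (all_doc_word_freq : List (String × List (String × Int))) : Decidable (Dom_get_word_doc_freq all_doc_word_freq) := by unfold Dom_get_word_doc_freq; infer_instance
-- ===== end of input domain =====

-- B replaces A's per-word integer counter (and A's redundant self-lookup of each document's
-- dict) by a word -> set-of-document-keys index built from .items(), with the counts taken
-- as set sizes in a separate final pass; same return value, alternative decomposition.


-- ===== PORT A =====
-- inner loop body: word_doc_freq[word] = word_doc_freq.get(word, 0) + 1
def pvAStep (wdf : PySem.Dict String Int) (wkv : String × Int) : PySem.Dict String Int :=
  wdf.insert wkv.1 (wdf.getD wkv.1 0 + 1)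

def get_word_doc_freq (all_doc_word_freq : List (String × List (String × Int))) : List (String × Int) :=
  -- for doc in all_doc_word_freq: wf = all_doc_word_freq.get(doc, {}); for word in wf: …
  (all_doc_word_freq.foldl
    (fun wdf dockv =>
      ((PySem.Dict.mk all_doc_word_freq).getD dockv.1 []).foldl pvAStep wdf)
    PySem.Dict.empty).items

-- ===== PORT B =====
-- inner loop body: word_docs.setdefault(word, set()).add(doc)
def pvBStep (doc : String) (wd : PySem.Dict String (PySem.Set String)) (wkv : String × Int) :
    PySem.Dict String (PySem.Set String) :=
  wd.insert wkv.1 (PySem.Set.add (wd.getD wkv.1 PySem.Set.empty) doc)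

def get_word_doc_freq_alt (all_doc_word_freq : List (String × List (String × Int))) : List (String × Int) :=
  -- for doc, wf in all_doc_word_freq.items(): for word in wf: word_docs.setdefault(word, set()).add(doc)
  -- return {word: len(docs) for word, docs in word_docs.items()}
  ((all_doc_word_freq.foldl
      (fun wd dockv => dockv.2.foldl (pvBStep dockv.1) wd)
      PySem.Dict.empty).items).map (fun q => (q.1, PySem.Set.len q.2))

-- ===== PRECONDITION & SPEC =====
-- Pre_ excludes association lists with duplicate document keys or duplicate word keys inside a
-- document: A's parameter is a Python dict of dicts, which cannot carry duplicate keys, so the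
-- assoc-list encoding with duplicates represents no input A ever receives.
def Pre_get_word_doc_freq (all_doc_word_freq : List (String × List (String × Int))) : Prop :=
  (all_doc_word_freq.map Prod.fst).Nodup ∧
  ∀ p ∈ all_doc_word_freq, (p.2.map Prod.fst).Nodup
instance (all_doc_word_freq : List (String × List (String × Int))) : Decidable (Pre_get_word_doc_freq all_doc_word_freq) := by unfold Pre_get_word_doc_freq; infer_instance

def pvWitness_get_word_doc_freq : (List (String × List (String × Int))) :=
  [("d1", [("a", 2), ("b", 1)]), ("d2", [("a", 3)])]

def Spec_get_word_doc_freq (all_doc_word_freq : List (String × List (String × Int))) (out : List (String × Int)) : Prop := out = get_word_doc_freq_alt all_doc_word_freq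
instance (all_doc_word_freq : List (String × List (String × Int))) (out : List (String × Int)) : Decidable (Spec_get_word_doc_freq all_doc_word_freq out) := by unfold Spec_get_word_doc_freq; infer_instance

-- ===== CLAIM (what is proved, stated in full; the proofs are below) =====
def Claim_equal_get_word_doc_freq : Prop := ∀ (all_doc_word_freq : List (String × List (String × Int))), Dom_get_word_doc_freq all_doc_word_freq → Pre_get_word_doc_freq all_doc_word_freq → Spec_get_word_doc_freq all_doc_word_freq (get_word_doc_freq all_doc_word_freq)

-- ===== LEMMAS AND PROOFS =====


-- value map relating B's index entries to A's counter entries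
def pvLen (q : String × PySem.Set String) : String × Int := (q.1, PySem.Set.len q.2)

lemma pv_keys_eq {wdf : PySem.Dict String Int} {wd : PySem.Dict String (PySem.Set String)}
    (hrel : wdf.items = wd.items.map pvLen) : wdf.keys = wd.keys := by
  simp only [PySem.Dict.keys, hrel, List.map_map]
  rfl

lemma pv_contains_eq {wdf : PySem.Dict String Int} {wd : PySem.Dict String (PySem.Set String)}
    (hrel : wdf.items = wd.items.map pvLen) (w : String) : wdf.contains w = wd.contains w := by
  rw [PySem.Dict.contains_eq_decide_mem_keys, PySem.Dict.contains_eq_decide_mem_keys,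
    pv_keys_eq hrel]

lemma pv_mem_items_eq {ν : Type} (d : PySem.Dict String ν) (hk : d.keys.Nodup) {w : String}
    {v v' : ν} (h1 : (w, v) ∈ d.items) (h2 : (w, v') ∈ d.items) : v = v' := by
  have a := (PySem.Dict.get?_eq_some_iff_mem_items d w v hk).2 h1
  have b := (PySem.Dict.get?_eq_some_iff_mem_items d w v' hk).2 h2
  rw [a] at b
  exact Option.some.inj b

-- one document (word list wf, key doc): the relation, key-nodup and set-content invariants
lemma pv_inner (doc : String) (S : List String) :
    ∀ (wf : List (String × Int)) (wdf : PySem.Dict String Int)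
      (wd : PySem.Dict String (PySem.Set String)),
    (wf.map Prod.fst).Nodup →
    wd.keys.Nodup →
    wdf.items = wd.items.map pvLen →
    (∀ q ∈ wd.items, ∀ x ∈ q.2, x = doc ∨ x ∈ S) →
    (∀ q ∈ wd.items, q.1 ∈ wf.map Prod.fst → doc ∉ q.2) →
    (wf.foldl pvAStep wdf).items = (wf.foldl (pvBStep doc) wd).items.map pvLen ∧
    (wf.foldl (pvBStep doc) wd).keys.Nodup ∧
    (∀ q ∈ (wf.foldl (pvBStep doc) wd).items, ∀ x ∈ q.2, x = doc ∨ x ∈ S) := by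
  intro wf
  induction wf with
  | nil => intro wdf wd _ hkeys hrel hsub _; exact ⟨hrel, hkeys, hsub⟩
  | cons w rest ih =>
    intro wdf wd hw hkeys hrel hsub hdf
    rw [List.map_cons, List.nodup_cons] at hw
    obtain ⟨hwnotin, hwrest⟩ := hw
    simp only [List.foldl_cons]
    -- the new B-side set stored at w.1
    have hkeys' : ((pvBStep doc wd w).keys).Nodup :=
      PySem.Dict.nodup_keys_insert wd w.1 _ hkeys
    have hsub' : ∀ q ∈ (pvBStep doc wd w).items, ∀ x ∈ q.2, x = doc ∨ x ∈ S := by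
      intro q hq x hx
      rcases (PySem.Dict.mem_items_insert wd w.1 _ q).1 hq with hq | ⟨hq, _⟩
      · subst hq
        rcases (PySem.Set.mem_add _ _ _).1 hx with hx | hx
        · have := PySem.Dict.getD_of_not_contains (d := wd) (k := w.1) PySem.Set.empty
          by_cases hc : wd.contains w.1 = true
          · have hkmem : w.1 ∈ wd.keys := (PySem.Dict.contains_iff_mem_keys wd w.1).1 hc
            have hkm : w.1 ∈ wd.items.map Prod.fst := by
              simpa [PySem.Dict.keys] using hkmem
            obtain ⟨⟨k, st⟩, hqmem, hk⟩ := List.mem_map.1 hkm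
            dsimp at hk; subst hk
            rw [PySem.Dict.getD_of_mem_items wd hqmem hkeys] at hx
            exact hsub _ hqmem x hx
          · rw [this (by simpa using hc)] at hx
            simp [PySem.Set.empty] at hx
        · exact Or.inl hx
      · exact hsub q hq x hx
    have hdf' : ∀ q ∈ (pvBStep doc wd w).items, q.1 ∈ rest.map Prod.fst → doc ∉ q.2 := by
      intro q hq hq1
      rcases (PySem.Dict.mem_items_insert wd w.1 _ q).1 hq with hq | ⟨hq, hne⟩
      · subst hq; exact absurd hq1 hwnotin
      · exact hdf q hq (List.mem_cons_of_mem _ hq1)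
    -- the A/B relation after one word
    have hcw := pv_contains_eq hrel w.1
    have hrel' : (pvAStep wdf w).items = (pvBStep doc wd w).items.map pvLen := by
      by_cases hc : wd.contains w.1 = true
      · have hkmem : w.1 ∈ wd.keys := (PySem.Dict.contains_iff_mem_keys wd w.1).1 hc
        have hkm : w.1 ∈ wd.items.map Prod.fst := by simpa [PySem.Dict.keys] using hkmem
        obtain ⟨⟨k, st⟩, hqmem, hk⟩ := List.mem_map.1 hkm
        dsimp at hk; subst hk
        have hgetB : wd.getD w.1 PySem.Set.empty = st :=
          PySem.Dict.getD_of_mem_items wd hqmem hkeys PySem.Set.empty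
        have hAmem : (w.1, PySem.Set.len st) ∈ wdf.items := by
          rw [hrel]; exact List.mem_map.2 ⟨(w.1, st), hqmem, rfl⟩
        have hkeysA : wdf.keys.Nodup := by rw [pv_keys_eq hrel]; exact hkeys
        have hgetA : wdf.getD w.1 0 = PySem.Set.len st :=
          PySem.Dict.getD_of_mem_items wdf hAmem hkeysA 0
        have hdocst : doc ∉ st := hdf (w.1, st) hqmem (by simp)
        have hadd : PySem.Set.add (wd.getD w.1 PySem.Set.empty) doc = st ++ [doc] := by
          rw [hgetB]; exact PySem.Set.add_of_not_mem hdocst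
        simp only [pvAStep, pvBStep, hgetA, hadd]
        rw [PySem.Dict.items_insert_of_contains _ _ (hcw ▸ hc),
          PySem.Dict.items_insert_of_contains _ _ hc, hrel, List.map_map, List.map_map]
        apply List.map_congr_left
        intro q hq
        simp only [Function.comp_apply, pvLen]
        by_cases hqw : q.1 = w.1
        · have hq2 : q.2 = st := by
            apply pv_mem_items_eq wd hkeys _ hqmem
            rw [← hqw]; exact hq
          simp only [hqw, beq_self_eq_true, if_true, hq2, PySem.Set.len]
          simp
        · simp [hqw]
      · have hcf : wd.contains w.1 = false := by simpa using hc
        have hgetA : wdf.getD w.1 0 = 0 :=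
          PySem.Dict.getD_of_not_contains wdf 0 (hcw ▸ hcf)
        have hgetB : wd.getD w.1 PySem.Set.empty = PySem.Set.empty :=
          PySem.Dict.getD_of_not_contains wd PySem.Set.empty hcf
        simp only [pvAStep, pvBStep, hgetA, hgetB]
        rw [PySem.Dict.items_insert_of_not_contains _ _ (hcw ▸ hcf),
          PySem.Dict.items_insert_of_not_contains _ _ hcf, hrel, List.map_append]
        simp [pvLen, PySem.Set.len, PySem.Set.add, PySem.Set.empty, PySem.Set.contains]
    exact ih (pvAStep wdf w) (pvBStep doc wd w) hwrest hkeys' hrel' hsub' hdf'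

-- outer loop over the documents
lemma pv_outer (l : List (String × List (String × Int))) :
    ∀ (S : List String) (wdf : PySem.Dict String Int) (wd : PySem.Dict String (PySem.Set String)),
    (l.map Prod.fst).Nodup →
    (∀ p ∈ l, (p.2.map Prod.fst).Nodup) →
    (∀ p ∈ l, p.1 ∉ S) →
    wd.keys.Nodup →
    wdf.items = wd.items.map pvLen →
    (∀ q ∈ wd.items, ∀ x ∈ q.2, x ∈ S) →
    (l.foldl (fun wdf dockv => dockv.2.foldl pvAStep wdf) wdf).items =
      (l.foldl (fun wd dockv => dockv.2.foldl (pvBStep dockv.1) wd) wd).items.map pvLen := by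
  induction l with
  | nil => intro S wdf wd _ _ _ _ hrel _; simpa using hrel
  | cons p rest ih =>
    intro S wdf wd hnd hw hfresh hkeys hrel hsub
    rw [List.map_cons, List.nodup_cons] at hnd
    obtain ⟨hpnotin, hndrest⟩ := hnd
    simp only [List.foldl_cons]
    have hfreshp : p.1 ∉ S := hfresh p (List.mem_cons_self)
    have hinner := pv_inner p.1 S p.2 wdf wd (hw p (List.mem_cons_self)) hkeys hrel
      (fun q hq x hx => Or.inr (hsub q hq x hx))
      (fun q hq _ hdocin => hfreshp (hsub q hq _ hdocin))
    obtain ⟨hrel', hkeys', hsub'⟩ := hinner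
    apply ih (p.1 :: S) _ _ hndrest (fun q hq => hw q (List.mem_cons_of_mem _ hq))
      ?_ hkeys' hrel' ?_
    · intro q hq
      simp only [List.mem_cons, not_or]
      exact ⟨fun h => hpnotin (h ▸ List.mem_map.2 ⟨q, hq, rfl⟩), hfresh q (List.mem_cons_of_mem _ hq)⟩
    · intro q hq x hx
      rcases hsub' q hq x hx with h | h
      · exact h ▸ List.mem_cons_self
      · exact List.mem_cons_of_mem _ h

-- ===== VERDICT (by name: the statement is the Claim_ definition above) =====
theorem get_word_doc_freq_spec : Claim_equal_get_word_doc_freq := by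
  intro l _ hpre
  obtain ⟨hdocs, hwords⟩ := hpre
  show get_word_doc_freq l = get_word_doc_freq_alt l
  unfold get_word_doc_freq get_word_doc_freq_alt
  rw [PySem.List.foldl_congr_mem l _ (fun wdf dockv => dockv.2.foldl pvAStep wdf) _
    (by
      intro acc x hx
      have : (PySem.Dict.mk l).getD x.1 [] = x.2 :=
        PySem.Dict.getD_of_mem_items (PySem.Dict.mk l) hx hdocs []
      rw [this])]
  exact pv_outer l [] PySem.Dict.empty PySem.Dict.empty hdocs hwords
    (by simp) PySem.Dict.nodup_keys_empty (by rfl)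
    (by intro q hq; simp [PySem.Dict.empty] at hq)
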